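-- pv_equiv track=rewrite | github.com/haimrubinstein/redux-base | src/downloadLocalization.py | getJsonKeys
-- ===== SOURCE A (Python) =====
-- def getJsonKeys(key):
--     splited = key.split('[')
--     if len(splited) <= 1:
--         return []
--     else:
--         keys = [splited[0]]
--         del splited[0]
--         middleKeys = ''.join(splited).split(']')
--         for k in middleKeys:
--             if k:
--                 keys.append(k)
--         return keys
-- ===== SOURCE B (Python) =====
-- def getJsonKeys(key):
--     res = []
--     buf = []
--     seen = False
--     for c in key:
--         if not seen:
--             if c == '[':
--                 res.append(''.join(buf))
--                 buf = []
--                 seen = True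
--             else:
--                 buf.append(c)
--         else:
--             if c == ']':
--                 if buf:
--                     res.append(''.join(buf))
--                 buf = []
--             elif c != '[':
--                 buf.append(c)
--     if not seen:
--         return []
--     if buf:
--         res.append(''.join(buf))
--     return res
-- ===== Notes on version B (the rewrite author's own statement) =====
-- stated objective: alternative
-- what changed: Replaced the split('[')/join/split(']') pipeline with a single left-to-right character scan that maintains a buffer and a seen-bracket flag, emitting tokens in one pass.
import Mathlib
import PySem

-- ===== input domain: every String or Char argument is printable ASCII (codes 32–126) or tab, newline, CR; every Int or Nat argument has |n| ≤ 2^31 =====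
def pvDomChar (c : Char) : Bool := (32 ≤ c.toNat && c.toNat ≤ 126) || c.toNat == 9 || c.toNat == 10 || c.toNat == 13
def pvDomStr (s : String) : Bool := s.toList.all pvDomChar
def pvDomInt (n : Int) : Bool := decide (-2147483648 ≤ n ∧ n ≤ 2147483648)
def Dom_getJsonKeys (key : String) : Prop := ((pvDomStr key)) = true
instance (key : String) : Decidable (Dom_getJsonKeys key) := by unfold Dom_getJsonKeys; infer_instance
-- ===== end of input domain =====

-- B is a one-pass character scan instead of A's split/join/split pipeline; same return value on every input.

-- ===== PORT A =====
def getJsonKeys (key : String) : List String :=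
  let splited := PySem.Chars.splitOn key.toList ['[']
  if splited.length ≤ 1 then []
  else
    match splited with
    | [] => []  -- unreachable: length > 1
    | s0 :: rest =>
      let middleKeys := PySem.Chars.splitOn (PySem.Chars.join [] rest) [']']
      middleKeys.foldl (fun keys k => if k ≠ [] then keys ++ [String.mk k] else keys)
        [String.mk s0]

-- ===== PORT B =====
def altLoop : List Char → List Char → Bool → List String → List String
  | [], buf, seen, res =>
      if seen then (if buf ≠ [] then res ++ [String.mk buf] else res) else []
  | c :: cs, buf, seen, res =>
      if seen = false then
        if c = '[' then altLoop cs [] true (res ++ [String.mk buf])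
        else altLoop cs (buf ++ [c]) false res
      else
        if c = ']' then altLoop cs [] true (if buf ≠ [] then res ++ [String.mk buf] else res)
        else if c = '[' then altLoop cs buf true res
        else altLoop cs (buf ++ [c]) true res

def getJsonKeys_alt (key : String) : List String :=
  altLoop key.toList [] false []

-- ===== PRECONDITION & SPEC =====
def Spec_getJsonKeys (key : String) (out : List String) : Prop := out = getJsonKeys_alt key
instance (key : String) (out : List String) : Decidable (Spec_getJsonKeys key out) := by unfold Spec_getJsonKeys; infer_instance

-- ===== CLAIM (what is proved, stated in full; the proofs are below) =====
def Claim_equal_getJsonKeys : Prop := ∀ (key : String), Dom_getJsonKeys key → Spec_getJsonKeys key (getJsonKeys key)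

-- ===== LEMMAS AND PROOFS =====

/-- Structural single-char splitter used to characterise both ports. -/
def splitC (d : Char) : List Char → List (List Char)
  | [] => [[]]
  | c :: cs =>
      if c = d then [] :: splitC d cs
      else
        match splitC d cs with
        | [] => [[c]]
        | p :: ps => (c :: p) :: ps

def consHead (pre : List Char) : List (List Char) → List (List Char)
  | [] => [pre]
  | p :: ps => (pre ++ p) :: ps

theorem splitC_ne_nil (d : Char) (l : List Char) : splitC d l ≠ [] := by
  cases l with
  | nil => simp [splitC]
  | cons c cs =>
    simp only [splitC]
    split
    · simp
    · split <;> simp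

theorem consHead_nil_of_ne (x : List (List Char)) (h : x ≠ []) : consHead [] x = x := by
  cases x with
  | nil => exact absurd rfl h
  | cons p ps => simp [consHead]

theorem splitOn_go_eq (d : Char) :
    ∀ fuel (l cur : List Char) (acc : List (List Char)), l.length < fuel →
      PySem.Chars.splitOn.go [d] fuel l cur acc =
        acc.reverse ++ consHead cur.reverse (splitC d l) := by
  intro fuel
  induction fuel with
  | zero => intro l cur acc h; omega
  | succ n ih =>
    intro l cur acc h
    cases l with
    | nil => simp [PySem.Chars.splitOn.go, splitC, consHead]
    | cons c cs =>
      simp only [PySem.Chars.splitOn.go]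
      by_cases hcd : c = d
      · have hpre : [d].isPrefixOf (c :: cs) = true := by
          simp [List.isPrefixOf, hcd]
        rw [if_pos hpre]
        simp only [List.length_cons] at h
        rw [ih _ _ _ (by simpa using Nat.lt_of_succ_lt_succ h)]
        have hsp := splitC_ne_nil d cs
        simp only [splitC, if_pos hcd, consHead_nil_of_ne _ hsp, consHead, List.reverse_cons,
          List.append_assoc, List.singleton_append, List.drop_succ_cons, List.drop_zero,
          List.reverse_nil, List.nil_append]
        cases hsp2 : splitC d cs with
        | nil => exact absurd hsp2 hsp
        | cons p ps => simp [hsp2]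
      · have hpre : [d].isPrefixOf (c :: cs) = false := by
          simp [List.isPrefixOf]
          intro hdc; exact absurd hdc.symm hcd
        rw [if_neg (by simp [hpre])]
        simp only [List.length_cons] at h
        rw [ih _ _ _ (by omega)]
        simp only [splitC, if_neg hcd]
        rcases hsp : splitC d cs with _ | ⟨p, ps⟩
        · exact absurd hsp (splitC_ne_nil d cs)
        · simp [consHead]

theorem splitOn_eq (d : Char) (l : List Char) :
    PySem.Chars.splitOn l [d] = splitC d l := by
  unfold PySem.Chars.splitOn
  rw [splitOn_go_eq d (l.length + 1) l [] [] (by omega)]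
  simp [consHead_nil_of_ne _ (splitC_ne_nil d l)]

theorem flatten_splitC (d : Char) (l : List Char) :
    (splitC d l).flatten = l.filter (· ≠ d) := by
  induction l with
  | nil => simp [splitC]
  | cons c cs ih =>
    simp only [splitC]
    by_cases hcd : c = d
    · simp only [hcd, List.filter_cons]
      simpa using ih
    · rcases hsp : splitC d cs with _ | ⟨p, ps⟩
      · exact absurd hsp (splitC_ne_nil d cs)
      · rw [if_neg hcd]
        rw [hsp] at ih
        simp only [List.filter_cons, List.flatten_cons] at ih ⊢
        simpa [hcd] using ih

theorem splitC_not_mem (d : Char) (l : List Char) (h : d ∉ l) : splitC d l = [l] := by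
  induction l with
  | nil => simp [splitC]
  | cons c cs ih =>
    simp only [List.mem_cons, not_or] at h
    simp [splitC, Ne.symm h.1, ih h.2]

theorem splitC_first (d : Char) (pre rest : List Char) (h : d ∉ pre) :
    splitC d (pre ++ d :: rest) = pre :: splitC d rest := by
  induction pre with
  | nil => simp [splitC]
  | cons c cs ih =>
    simp only [List.mem_cons, not_or] at h
    simp [splitC, Ne.symm h.1, ih h.2]

theorem exists_first_split (d : Char) (l : List Char) (h : d ∈ l) :
    ∃ pre rest, l = pre ++ d :: rest ∧ d ∉ pre := by
  induction l with
  | nil => simp at h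
  | cons c cs ih =>
    by_cases hcd : c = d
    · exact ⟨[], cs, by simp [hcd], by simp⟩
    · have hm : d ∈ cs := by
        rcases List.mem_cons.mp h with h1 | h1
        · exact absurd h1.symm hcd
        · exact h1
      obtain ⟨pre, rest, heq, hnm⟩ := ih hm
      refine ⟨c :: pre, rest, by simp [heq], ?_⟩
      simp only [List.mem_cons, not_or]
      exact ⟨fun hdc => hcd hdc.symm, hnm⟩

theorem altLoop_no_bracket (l buf : List Char) (res : List String) (h : '[' ∉ l) :
    altLoop l buf false res = [] := by
  induction l generalizing buf with
  | nil => simp [altLoop]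
  | cons c cs ih =>
    simp only [List.mem_cons, not_or] at h
    simp [altLoop, Ne.symm h.1, ih _ h.2]

theorem altLoop_prefix (pre l buf : List Char) (res : List String) (h : '[' ∉ pre) :
    altLoop (pre ++ '[' :: l) buf false res =
      altLoop l [] true (res ++ [String.mk (buf ++ pre)]) := by
  induction pre generalizing buf with
  | nil => simp [altLoop]
  | cons c cs ih =>
    simp only [List.mem_cons, not_or] at h
    simp only [List.cons_append, altLoop]
    rw [if_pos trivial, if_neg (Ne.symm h.1), ih _ h.2]
    simp

theorem altLoop_middle (l buf : List Char) (res : List String) :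
    altLoop l buf true res =
      res ++ ((consHead buf (splitC ']' (l.filter (· ≠ '[')))).filter (· ≠ [])).map String.mk := by
  induction l generalizing buf res with
  | nil =>
    simp only [altLoop, List.filter_nil, splitC, consHead]
    by_cases hb : buf = [] <;> simp [hb, List.filter_cons]
  | cons c cs ih =>
    simp only [altLoop]
    rw [if_neg (by simp)]
    by_cases hc1 : c = ']'
    · rw [if_pos hc1, ih]
      have : (c :: cs).filter (· ≠ '[') = ']' :: cs.filter (· ≠ '[') := by
        simp [List.filter_cons, hc1]
      rw [this]
      simp only [splitC, if_pos rfl]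
      rcases hsp : splitC ']' (cs.filter (· ≠ '[')) with _ | ⟨p, ps⟩
      · exact absurd hsp (splitC_ne_nil _ _)
      · by_cases hb : buf = [] <;>
          simp [hb, consHead, List.filter_cons, hsp]
    · rw [if_neg hc1]
      by_cases hc2 : c = '['
      · rw [if_pos hc2, ih]
        have : (c :: cs).filter (· ≠ '[') = cs.filter (· ≠ '[') := by
          simp [List.filter_cons, hc2]
        rw [this]
      · rw [if_neg hc2, ih]
        have : (c :: cs).filter (· ≠ '[') = c :: cs.filter (· ≠ '[') := by
          simp [List.filter_cons, hc2]
        rw [this]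
        simp only [splitC, if_neg hc1]
        rcases hsp : splitC ']' (cs.filter (· ≠ '[')) with _ | ⟨p, ps⟩
        · exact absurd hsp (splitC_ne_nil _ _)
        · simp [consHead]

theorem flatten_intersperse_nil (ps : List (List Char)) :
    (List.intersperse [] ps).flatten = ps.flatten := by
  induction ps with
  | nil => simp
  | cons a t ih =>
    cases t with
    | nil => simp
    | cons b t2 => simp_all [List.intersperse]

-- ===== VERDICT (by name: the statement is the Claim_ definition above) =====
theorem getJsonKeys_spec : Claim_equal_getJsonKeys := by
  intro key _
  unfold Spec_getJsonKeys getJsonKeys getJsonKeys_alt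
  rw [splitOn_eq]
  by_cases hm : '[' ∈ key.toList
  · obtain ⟨pre, rest, heq, hnm⟩ := exists_first_split '[' key.toList hm
    rw [heq, splitC_first '[' pre rest hnm]
    have hlen : (pre :: splitC '[' rest).length > 1 := by
      have := splitC_ne_nil '[' rest
      cases hsp : splitC '[' rest with
      | nil => exact absurd hsp this
      | cons p ps => simp [hsp]
    rw [if_neg (by omega)]
    simp only []
    have hjoin : PySem.Chars.join [] (splitC '[' rest) = rest.filter (· ≠ '[') := by
      rw [← flatten_splitC]
      simp [PySem.Chars.join, List.intercalate, flatten_intersperse_nil]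
    rw [hjoin, splitOn_eq]
    have hfun : (fun (keys : List String) (k : List Char) => if k ≠ [] then keys ++ [String.mk k] else keys)
        = (fun keys k => if (fun (k : List Char) => decide (k ≠ [])) k = true then keys ++ [String.mk k] else keys) := by
      funext keys k; simp
    rw [hfun, PySem.List.foldl_append_if (fun (k : List Char) => decide (k ≠ [])) String.mk]
    rw [altLoop_prefix pre rest [] [] hnm, altLoop_middle]
    simp [consHead_nil_of_ne _ (splitC_ne_nil ']' _)]
  · rw [splitC_not_mem '[' key.toList hm]
    rw [if_pos (by simp)]
    rw [altLoop_no_bracket _ _ _ hm]
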